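-- pv_equiv track=rewrite | github.com/ahaiceid/adventofcode.com | 2024/day/8/solver.py | get_per_frequency_locations
-- ===== SOURCE A (Python) =====
-- def get_per_frequency_locations(antenna_locations):
--     frequency_dict = {}
--     for frequency,position in antenna_locations:
--         try:
--             frequency_dict[frequency].append(position)
--         except KeyError:
--             frequency_dict[frequency] = [position]
--     return frequency_dict
-- ===== SOURCE B (Python) =====
-- def get_per_frequency_locations(antenna_locations):
--     # Two-pass: first collect frequencies in first-occurrence order,
--     # then build each group with a comprehension scan.
--     freqs = []
--     for frequency, _ in antenna_locations:
--         if frequency not in freqs: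
--             freqs.append(frequency)
--     return {f: [p for g, p in antenna_locations if g == f] for f in freqs}
-- ===== Notes on version B (the rewrite author's own statement) =====
-- stated objective: alternative
-- what changed: Replaces the single-pass try/except dict accumulation with a two-pass scheme: one pass dedups the frequencies in first-occurrence order, then each group is rebuilt by a comprehension scan over the input.
import Mathlib
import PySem

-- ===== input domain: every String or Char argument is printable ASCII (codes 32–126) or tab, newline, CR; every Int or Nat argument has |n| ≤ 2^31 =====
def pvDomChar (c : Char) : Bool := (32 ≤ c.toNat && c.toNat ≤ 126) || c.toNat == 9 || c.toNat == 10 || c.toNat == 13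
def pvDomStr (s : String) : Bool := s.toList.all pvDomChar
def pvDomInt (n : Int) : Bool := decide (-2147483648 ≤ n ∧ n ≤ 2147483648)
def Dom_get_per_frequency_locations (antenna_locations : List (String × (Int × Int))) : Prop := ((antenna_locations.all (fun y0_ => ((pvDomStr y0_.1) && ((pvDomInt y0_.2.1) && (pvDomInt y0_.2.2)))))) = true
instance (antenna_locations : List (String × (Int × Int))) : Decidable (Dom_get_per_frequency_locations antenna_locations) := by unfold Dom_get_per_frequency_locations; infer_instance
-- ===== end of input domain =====

-- B replaces A's single-pass try/except dict accumulation by a two-pass scheme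
-- (dedup the frequencies in first-occurrence order, then rebuild each group by a
-- filtering scan); objective: alternative decomposition, same results.

-- ===== PORT A =====
-- try: frequency_dict[frequency].append(position) / except KeyError: frequency_dict[frequency] = [position]
def stepA_get_per_frequency_locations (d : PySem.Dict String (List (Int × Int)))
    (fp : String × (Int × Int)) : PySem.Dict String (List (Int × Int)) :=
  match d.get? fp.1 with
  | some l => d.insert fp.1 (l ++ [fp.2])   -- key present: append to its list
  | none => d.insert fp.1 [fp.2]            -- KeyError branch: fresh singleton list

def get_per_frequency_locations (antenna_locations : List (String × (Int × Int))) :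
    List (String × List (Int × Int)) :=
  (antenna_locations.foldl stepA_get_per_frequency_locations PySem.Dict.empty).items

-- ===== PORT B =====
-- first pass: frequencies in first-occurrence order ('if frequency not in freqs')
def altFreqs_get_per_frequency_locations (antenna_locations : List (String × (Int × Int))) : List String :=
  antenna_locations.foldl (fun acc fp => if acc.contains fp.1 then acc else acc ++ [fp.1]) []

-- second pass: {f: [p for g, p in antenna_locations if g == f] for f in freqs}
def get_per_frequency_locations_alt (antenna_locations : List (String × (Int × Int))) :
    List (String × List (Int × Int)) :=
  (altFreqs_get_per_frequency_locations antenna_locations).map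
    (fun f => (f, (antenna_locations.filter (fun gp => gp.1 == f)).map (·.2)))

-- ===== PRECONDITION & SPEC =====
def Spec_get_per_frequency_locations (antenna_locations : List (String × (Int × Int))) (out : List (String × List (Int × Int))) : Prop := out = get_per_frequency_locations_alt antenna_locations
instance (antenna_locations : List (String × (Int × Int))) (out : List (String × List (Int × Int))) : Decidable (Spec_get_per_frequency_locations antenna_locations out) := by unfold Spec_get_per_frequency_locations; infer_instance

-- ===== CLAIM (what is proved, stated in full; the proofs are below) =====
def Claim_equal_get_per_frequency_locations : Prop := ∀ (antenna_locations : List (String × (Int × Int))), Dom_get_per_frequency_locations antenna_locations → Spec_get_per_frequency_locations antenna_locations (get_per_frequency_locations antenna_locations)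

-- ===== LEMMAS AND PROOFS =====

-- A's try/except step is exactly dict.modify with default []
theorem stepA_eq_modify (d : PySem.Dict String (List (Int × Int))) (fp : String × (Int × Int)) :
    stepA_get_per_frequency_locations d fp = d.modify fp.1 [] (· ++ [fp.2]) := by
  cases h : d.get? fp.1 <;>
    simp [stepA_get_per_frequency_locations, h, PySem.Dict.insert, PySem.Dict.modify,
      PySem.Dict.getD]

-- B's first pass is the ordered dedup of the frequency column
theorem altFreqs_eq_ofList (xs : List (String × (Int × Int))) :
    altFreqs_get_per_frequency_locations xs = PySem.Set.ofList (xs.map (·.1)) := by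
  simp [altFreqs_get_per_frequency_locations, PySem.Set.ofList_eq_foldl, List.foldl_map,
    PySem.Set.add]

-- ===== VERDICT (by name: the statement is the Claim_ definition above) =====
theorem get_per_frequency_locations_spec : Claim_equal_get_per_frequency_locations := by
  intro xs _
  show get_per_frequency_locations xs = get_per_frequency_locations_alt xs
  have hstep : stepA_get_per_frequency_locations =
      (fun d fp => d.modify fp.1 [] (· ++ [fp.2])) :=
    funext fun d => funext fun fp => stepA_eq_modify d fp
  unfold get_per_frequency_locations get_per_frequency_locations_alt
  rw [hstep]
  have hnd : (xs.foldl (fun d fp => d.modify fp.1 [] (· ++ [fp.2])) PySem.Dict.empty).keys.Nodup :=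
    PySem.Dict.nodup_keys_foldl_modify_key xs (·.1) [] (fun d x => (· ++ [x.2])) _ (by simp)
  rw [PySem.Dict.items_eq_map_keys _ hnd []]
  rw [PySem.Dict.keys_foldl_modify_key]
  have hkeys : PySem.Set.update (PySem.Dict.empty (κ := String) (ν := List (Int × Int))).keys
      (xs.map (·.1)) = PySem.Set.ofList (xs.map (·.1)) := by
    simp [PySem.Set.update, PySem.Set.ofList_eq_foldl, PySem.Dict.keys_empty]
  rw [hkeys, altFreqs_eq_ofList]
  apply List.map_congr_left
  intro f _
  rw [PySem.Dict.getD_foldl_modify_append]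
  simp [PySem.Dict.getD_empty]
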